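-- pv_equiv track=rewrite | github.com/CameronTheLetterOpener/ARC_EVO | search_arc.py | grid_contains
-- ===== SOURCE A (Python) =====
-- def grid_contains(grid, array):
--     #Check if a grid contains a certain pattern
--     contained = False
--     for i in range(len(grid)):
--         for j in range(len(grid[i])):
--             #Check if the pattern is contained in the grid
--             #The pattern can be bigger than 1x1
--             if(i + len(array) > len(grid) or j + len(array[0]) > len(grid[i])):
--                 continue
--             contained = True
--             for x in range(len(array)):
--                 for y in range(len(array[x])):
--                     if(array[x][y] != grid[i + x][j + y]):
--                         contained = False
--                         break
--                 if(not contained):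
--                     break
--             if(contained):
--                 break
--         if(contained):
--             break
--     return contained
-- ===== SOURCE B (Python) =====
-- def occurrences(row, pat):
--     q = len(pat)
--     return [j for j in range(len(row) - q + 1) if row[j:j + q] == pat]
--
--
-- def grid_contains(grid, array):
--     pat0 = array[0]
--     return any(
--         any(all(grid[i + x][j:j + len(array[x])] == array[x] for x in range(1, len(array)))
--             for j in occurrences(grid[i], pat0))
--         for i in range(len(grid) - len(array) + 1))
-- ===== Notes on version B (the rewrite author's own statement) =====
-- stated objective: alternative
-- what changed: B replaces A's four nested index loops with break-flag bookkeeping by a first-row anchor search: it collects the occurrence positions of the pattern's first row in each candidate grid row and verifies only those anchors, one slice comparison per remaining pattern row.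
-- outside the precondition, e.g. on grid_contains([[]], [[]]): A returns False, B returns True; on grid_contains([[1, 2], [3]], [[1, 2], [3, 4]]): A raises IndexError, B returns False; on grid_contains([[1, 2], [3]], [[9], [9]]): A returns False, B returns False
import Mathlib
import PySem

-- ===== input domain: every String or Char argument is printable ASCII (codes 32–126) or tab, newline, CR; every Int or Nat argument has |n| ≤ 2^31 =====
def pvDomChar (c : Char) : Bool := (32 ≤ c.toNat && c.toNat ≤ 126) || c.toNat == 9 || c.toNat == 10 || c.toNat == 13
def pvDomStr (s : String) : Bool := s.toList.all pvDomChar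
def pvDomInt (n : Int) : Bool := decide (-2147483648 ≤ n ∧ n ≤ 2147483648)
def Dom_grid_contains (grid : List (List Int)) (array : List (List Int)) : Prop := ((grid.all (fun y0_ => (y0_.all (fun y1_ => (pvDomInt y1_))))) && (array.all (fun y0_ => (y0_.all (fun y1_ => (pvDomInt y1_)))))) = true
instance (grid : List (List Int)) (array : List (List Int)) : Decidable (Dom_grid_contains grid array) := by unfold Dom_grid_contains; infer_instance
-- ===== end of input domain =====

-- B replaces A's four nested index loops (with break flags) by a first-row anchor search with
-- per-row slice verification; equivalence is proved on non-empty-first-row patterns in window-safe grids (Pre_).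

-- ===== PORT A =====
-- grid[r][c] (in range under Pre_; pyGetD defaults are never reached inside Pre_)
def gcCell (m : List (List Int)) (r c : Int) : Int :=
  PySem.List.pyGetD (PySem.List.pyGetD m r []) c 0

-- innermost loop 'for y in range(len(array[x])): if array[x][y] != grid[i+x][j+y]: contained=False; break'
def gcLoopY (g a : List (List Int)) (i j x : Int) : List Int → Bool
  | [] => true
  | y :: ys => if gcCell a x y ≠ gcCell g (i + x) (j + y) then false else gcLoopY g a i j x ys

-- 'for x in range(len(array)): …; if not contained: break'
def gcLoopX (g a : List (List Int)) (i j : Int) : List Int → Bool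
  | [] => true
  | x :: xs =>
      if gcLoopY g a i j x (PySem.List.pyRange 0 ((PySem.List.pyGetD a x []).length : Int) 1)
      then gcLoopX g a i j xs else false

-- 'for j in range(len(grid[i])): if guard: continue; contained=True; x-loop; if contained: break'
-- (contained := True immediately followed by the x-loop is gcLoopX, whose empty-loop value is true)
def gcLoopJ (g a : List (List Int)) (i : Int) (contained : Bool) : List Int → Bool
  | [] => contained
  | j :: js =>
      if (g.length : Int) < i + (a.length : Int) ∨
         ((PySem.List.pyGetD g i []).length : Int) < j + ((PySem.List.pyGetD a 0 []).length : Int)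
      then gcLoopJ g a i contained js
      else
        let c := gcLoopX g a i j (PySem.List.pyRange 0 (a.length : Int) 1)
        if c then c else gcLoopJ g a i c js

-- 'for i in range(len(grid)): …; if contained: break'
def gcLoopI (g a : List (List Int)) (contained : Bool) : List Int → Bool
  | [] => contained
  | i :: is =>
      let c := gcLoopJ g a i contained (PySem.List.pyRange 0 ((PySem.List.pyGetD g i []).length : Int) 1)
      if c then c else gcLoopI g a c is

def grid_contains (grid : List (List Int)) (array : List (List Int)) : Bool :=
  gcLoopI grid array false (PySem.List.pyRange 0 (grid.length : Int) 1)

-- ===== PORT B =====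
-- occurrences(row, pat) = [j for j in range(len(row)-len(pat)+1) if row[j:j+len(pat)] == pat]
def gcOcc (row pat : List Int) : List Int :=
  (PySem.List.pyRange 0 ((row.length : Int) - (pat.length : Int) + 1) 1).filter
    (fun j => PySem.List.slice row (some j) (some (j + (pat.length : Int))) == pat)

def grid_contains_alt (grid : List (List Int)) (array : List (List Int)) : Bool :=
  let pat0 := PySem.List.pyGetD array 0 []
  (PySem.List.pyRange 0 ((grid.length : Int) - (array.length : Int) + 1) 1).any fun i =>
    (gcOcc (PySem.List.pyGetD grid i []) pat0).any fun j =>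
      (PySem.List.pyRange 1 (array.length : Int) 1).all fun x =>
        PySem.List.slice (PySem.List.pyGetD grid (i + x) [])
            (some j) (some (j + ((PySem.List.pyGetD array x []).length : Int)))
          == PySem.List.pyGetD array x []

-- ===== PRECONDITION & SPEC =====
-- Pre_ restricts to the function's natural domain: a pattern with a non-empty first row, placed in
-- a grid where no candidate window can overrun a short lower row.  Excluded (A still returns on
-- some of them): empty patterns and empty first pattern rows, where A's False-vs-True answer is an
-- accident of its j-range; window-overrun grids, on which A raises IndexError or returns only
-- because a data mismatch happens to break the scan first.
def Pre_grid_contains (grid : List (List Int)) (array : List (List Int)) : Prop :=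
  array ≠ [] ∧
  array.headD [] ≠ [] ∧
  (∀ i < grid.length, ∀ x < array.length, i + array.length ≤ grid.length →
      (array.headD []).length ≤ (grid.getD i []).length →
      (grid.getD i []).length - (array.headD []).length + (array.getD x []).length
        ≤ (grid.getD (i + x) []).length)
instance (grid : List (List Int)) (array : List (List Int)) : Decidable (Pre_grid_contains grid array) := by
  unfold Pre_grid_contains; infer_instance

def pvWitness_grid_contains : List (List Int) × List (List Int) := ([[1, 2], [3, 4]], [[3, 4]])

def Spec_grid_contains (grid : List (List Int)) (array : List (List Int)) (out : Bool) : Prop := out = grid_contains_alt grid array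
instance (grid : List (List Int)) (array : List (List Int)) (out : Bool) : Decidable (Spec_grid_contains grid array out) := by unfold Spec_grid_contains; infer_instance

-- ===== CLAIM (what is proved, stated in full; the proofs are below) =====
def Claim_equal_grid_contains : Prop := ∀ (grid : List (List Int)) (array : List (List Int)), Dom_grid_contains grid array → Pre_grid_contains grid array → Spec_grid_contains grid array (grid_contains grid array)

-- ===== LEMMAS AND PROOFS =====

theorem gcLoopY_eq_all (g a : List (List Int)) (i j x : Int) (ys : List Int) :
    gcLoopY g a i j x ys = ys.all (fun y => gcCell a x y == gcCell g (i + x) (j + y)) := by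
  induction ys with
  | nil => rfl
  | cons y ys ih =>
      simp only [gcLoopY, List.all_cons, ih]
      by_cases h : gcCell a x y = gcCell g (i + x) (j + y) <;> simp [h]

theorem gcLoopX_eq_all (g a : List (List Int)) (i j : Int) (xs : List Int) :
    gcLoopX g a i j xs
      = xs.all (fun x => gcLoopY g a i j x (PySem.List.pyRange 0 ((PySem.List.pyGetD a x []).length : Int) 1)) := by
  induction xs with
  | nil => rfl
  | cons x xs ih =>
      simp only [gcLoopX, List.all_cons, ih]
      split <;> simp_all

theorem gcLoopJ_eq_any (g a : List (List Int)) (i : Int) (js : List Int) :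
    gcLoopJ g a i false js
      = js.any (fun j =>
          if (g.length : Int) < i + (a.length : Int) ∨
             ((PySem.List.pyGetD g i []).length : Int) < j + ((PySem.List.pyGetD a 0 []).length : Int)
          then false
          else gcLoopX g a i j (PySem.List.pyRange 0 (a.length : Int) 1)) := by
  induction js with
  | nil => rfl
  | cons j js ih =>
      simp only [gcLoopJ, List.any_cons]
      split
      · simpa using ih
      · rcases h : gcLoopX g a i j (PySem.List.pyRange 0 (a.length : Int) 1) <;> simp [ih]

theorem gcLoopI_eq_any (g a : List (List Int)) (is : List Int) :
    gcLoopI g a false is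
      = is.any (fun i => gcLoopJ g a i false (PySem.List.pyRange 0 ((PySem.List.pyGetD g i []).length : Int) 1)) := by
  induction is with
  | nil => rfl
  | cons i is ih =>
      simp only [gcLoopI, List.any_cons]
      rcases h : gcLoopJ g a i false (PySem.List.pyRange 0 ((PySem.List.pyGetD g i []).length : Int) 1) <;>
        simp [ih]

-- cell-by-cell equality over range(len pat) equals slice equality, when the window fits
theorem cells_eq_slice (grow pat : List Int) (j : Int) (hj : 0 ≤ j)
    (hle : j + (pat.length : Int) ≤ (grow.length : Int)) :
    ((PySem.List.pyRange 0 (pat.length : Int) 1).all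
        (fun y => PySem.List.pyGetD pat y 0 == PySem.List.pyGetD grow (j + y) 0))
      = (PySem.List.slice grow (some j) (some (j + (pat.length : Int))) == pat) := by
  lift j to ℕ using hj with m
  have hmn : m + pat.length ≤ grow.length := by exact_mod_cast hle
  apply Bool.eq_iff_iff.mpr
  simp only [List.all_eq_true, PySem.List.mem_pyRange_one, beq_iff_eq]
  rw [PySem.List.slice_natCast_add grow m pat.length]
  constructor
  · intro h
    apply List.ext_getElem
    · simp; omega
    · intro k hk1 hk2
      have hk : k < pat.length := by simpa using hk2
      have h1 := h (k : Int) ⟨by positivity, by exact_mod_cast hk⟩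
      rw [PySem.List.pyGetD_eq_getElem pat 0 (by positivity) (by exact_mod_cast hk)] at h1
      rw [PySem.List.pyGetD_eq_getElem grow 0 (by positivity) (by omega)] at h1
      simp only [← Nat.cast_add, Int.toNat_natCast] at h1
      simp only [List.getElem_take, List.getElem_drop]
      omega
  · intro h y hy
    obtain ⟨hy0, hyl⟩ := hy
    obtain ⟨k, rfl⟩ := Int.eq_ofNat_of_zero_le hy0
    have hk : k < pat.length := by exact_mod_cast hyl
    rw [PySem.List.pyGetD_eq_getElem pat 0 (by positivity) (by exact_mod_cast hk)]
    rw [PySem.List.pyGetD_eq_getElem grow 0 (by positivity) (by omega)]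
    simp only [← Nat.cast_add, Int.toNat_natCast]
    have h2 : (List.take pat.length (List.drop m grow))[k]'(by simp; omega) = pat[k] :=
      List.getElem_of_eq h (by simp; omega)
    rw [← h2]
    simp only [List.getElem_take, List.getElem_drop]

-- guarded scan over range(L) equals plain scan over range(L-q+1)  (q ≥ 1)
theorem any_range_guard (L q : Int) (hq : 1 ≤ q) (f : Int → Bool) :
    ((PySem.List.pyRange 0 L 1).any fun j => if L < j + q then false else f j)
      = ((PySem.List.pyRange 0 (L - q + 1) 1).any f) := by
  apply Bool.eq_iff_iff.mpr
  simp only [List.any_eq_true, PySem.List.mem_pyRange_one]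
  constructor
  · rintro ⟨j, ⟨h0, hL⟩, hf⟩
    by_cases hg : L < j + q
    · simp [hg] at hf
    · exact ⟨j, ⟨h0, by omega⟩, by simpa [hg] using hf⟩
  · rintro ⟨j, ⟨h0, hj⟩, hf⟩
    exact ⟨j, ⟨h0, by omega⟩, by simp [show ¬ L < j + q by omega, hf]⟩

theorem anyCongrMem (l : List Int) (f g : Int → Bool) (h : ∀ x ∈ l, f x = g x) :
    l.any f = l.any g := by
  induction l with
  | nil => rfl
  | cons x xs ih => simp_all

theorem allCongrMem (l : List Int) (f g : Int → Bool) (h : ∀ x ∈ l, f x = g x) :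
    l.all f = l.all g := by
  induction l with
  | nil => rfl
  | cons x xs ih => simp_all

theorem any_if_const (p : Prop) [Decidable p] (l : List Int) (f : Int → Bool) :
    (l.any fun j => if p then false else f j) = (if p then false else l.any f) := by
  split_ifs <;> simp_all

theorem if_or_false (p r : Prop) [Decidable p] [Decidable r] (x : Bool) :
    (if p ∨ r then false else x) = (if p then false else if r then false else x) := by
  split_ifs <;> tauto

-- B normalized: any over window rows, any over occurrence-filtered anchors folded into one range,
-- first-row condition folded into the full all-x check
theorem normB (g a : List (List Int)) (ha : a ≠ []) :
    grid_contains_alt g a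
      = (PySem.List.pyRange 0 ((g.length : Int) - (a.length : Int) + 1) 1).any (fun i =>
          (PySem.List.pyRange 0 (((PySem.List.pyGetD g i []).length : Int) - ((a.headD []).length : Int) + 1) 1).any (fun j =>
            (PySem.List.pyRange 0 (a.length : Int) 1).all (fun x =>
              PySem.List.slice (PySem.List.pyGetD g (i + x) [])
                  (some j) (some (j + ((PySem.List.pyGetD a x []).length : Int)))
                == PySem.List.pyGetD a x []))) := by
  obtain ⟨p0, t, rfl⟩ := List.exists_cons_of_ne_nil ha
  unfold grid_contains_alt gcOcc
  simp only [PySem.List.pyGetD_zero_cons, List.headD_cons]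
  apply anyCongrMem; intro i _
  rw [List.any_filter]
  apply anyCongrMem; intro j _
  rw [PySem.List.pyRange_one_cons (by simp : (0 : Int) < (((p0 :: t).length : Nat) : Int))]
  simp only [List.all_cons, add_zero, zero_add, PySem.List.pyGetD_zero_cons]

-- A normalized to the same expression, using Pre_'s rectangularity and window safety
theorem normA (g a : List (List Int)) (ha : a ≠ []) (hq0 : a.headD [] ≠ [])
    (hsafe : ∀ i < g.length, ∀ x < a.length, i + a.length ≤ g.length →
        (a.headD []).length ≤ (g.getD i []).length →
        (g.getD i []).length - (a.headD []).length + (a.getD x []).length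
          ≤ (g.getD (i + x) []).length) :
    grid_contains g a
      = (PySem.List.pyRange 0 ((g.length : Int) - (a.length : Int) + 1) 1).any (fun i =>
          (PySem.List.pyRange 0 (((PySem.List.pyGetD g i []).length : Int) - ((a.headD []).length : Int) + 1) 1).any (fun j =>
            (PySem.List.pyRange 0 (a.length : Int) 1).all (fun x =>
              PySem.List.slice (PySem.List.pyGetD g (i + x) [])
                  (some j) (some (j + ((PySem.List.pyGetD a x []).length : Int)))
                == PySem.List.pyGetD a x []))) := by
  have hP : 0 < a.length := List.length_pos_iff.mpr ha
  have hq : 0 < (a.headD []).length := List.length_pos_iff.mpr hq0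
  have hpat0 : PySem.List.pyGetD a 0 [] = a.headD [] := by
    obtain ⟨p0, t, rfl⟩ := List.exists_cons_of_ne_nil ha
    simp [PySem.List.pyGetD_zero_cons]
  have step1 : ∀ i, gcLoopJ g a i false (PySem.List.pyRange 0 ((PySem.List.pyGetD g i []).length : Int) 1)
      = (if (g.length : Int) < i + (a.length : Int) then false
         else (PySem.List.pyRange 0 (((PySem.List.pyGetD g i []).length : Int) - ((a.headD []).length : Int) + 1) 1).any
           (fun j => gcLoopX g a i j (PySem.List.pyRange 0 (a.length : Int) 1))) := by
    intro i
    rw [gcLoopJ_eq_any]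
    rw [anyCongrMem _ _ _ (fun j _ => if_or_false _ _ _)]
    rw [any_if_const]
    by_cases hp : (g.length : Int) < i + (a.length : Int)
    · simp [hp]
    · simp only [hp, if_false]
      rw [hpat0]
      exact any_range_guard _ _ (by exact_mod_cast hq) _
  rw [grid_contains, gcLoopI_eq_any]
  rw [anyCongrMem _ _ _ (fun i _ => step1 i)]
  rw [any_range_guard (g.length : Int) (a.length : Int) (by exact_mod_cast hP)]
  apply anyCongrMem; intro i hi
  apply anyCongrMem; intro j hj
  rw [gcLoopX_eq_all]
  apply allCongrMem; intro x hx
  rw [gcLoopY_eq_all]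
  simp only [PySem.List.mem_pyRange_one] at hi hj hx
  obtain ⟨ni, rfl⟩ := Int.eq_ofNat_of_zero_le hi.1
  obtain ⟨nx, rfl⟩ := Int.eq_ofNat_of_zero_le hx.1
  have hix : (ni : Int) + (nx : Int) = ((ni + nx : Nat) : Int) := by push_cast; ring
  simp only [PySem.List.pyGetD_natCast] at hj
  simp only [gcCell, hix, PySem.List.pyGetD_natCast]
  have hnx : nx < a.length := by omega
  have hsafe' := hsafe ni (by omega) nx hnx (by omega)
    (by omega : (a.headD []).length ≤ (g.getD ni []).length)
  rw [cells_eq_slice (g.getD (ni + nx) []) (a.getD nx []) j hj.1 (by omega)]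

-- ===== VERDICT (by name: the statement is the Claim_ definition above) =====
theorem grid_contains_spec : Claim_equal_grid_contains := by
  intro g a _ hpre
  obtain ⟨ha, hq0, hsafe⟩ := hpre
  unfold Spec_grid_contains
  rw [normA g a ha hq0 hsafe, normB g a ha]
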